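-- pv_equiv track=rewrite | github.com/artyzhang/Stop-Files-to-Excel | Stop Files to Excel Conversion Folder.py | cleanrows
-- ===== SOURCE A (Python) =====
-- def allblanks(i): # Returns blank if all items in a list are blank
--     if i.count('') == len(i):
--         return 'Blank'
--     else:
--         return i
--
-- def repetitions(rows): # Finds irregular ranges of blank values
--     transformed = [allblanks(r) for r in rows]
--     indexed = [i for i, j in enumerate(transformed) if j == 'Blank']
--     notinpattern = []
--     for i,k in enumerate(indexed[:-1]):
--         if k+2 != indexed[i+1]:
--             notinpattern.append(k)
--     return notinpattern
--
-- def cleanrows(delimitedrows): # Remove blank values, but preserve blanks if there are more than two in a row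
--     clean_rows = []
--     kept_blanks = repetitions(delimitedrows)
--     for count,row in enumerate(delimitedrows):
--         if allblanks(row) != 'Blank':
--             clean_rows.append(row)
--         else:
--             if count in kept_blanks:
--                 clean_rows.append(row)
--     return clean_rows
-- ===== SOURCE B (Python) =====
-- def cleanrows(delimitedrows):
--     # Single backward pass: next_blank[i] = nearest index j > i whose row is blank (else None),
--     # then one forward pass keeping non-blank rows and the blanks whose next blank is not at i+2.
--     n = len(delimitedrows)
--     next_blank = [None] * n
--     nb = None
--     for i in range(n - 1, -1, -1):
--         next_blank[i] = nb
--         if all(cell == '' for cell in delimitedrows[i]):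
--             nb = i
--     out = []
--     for i, row in enumerate(delimitedrows):
--         if not all(cell == '' for cell in row):
--             out.append(row)
--         elif next_blank[i] is not None and next_blank[i] != i + 2:
--             out.append(row)
--     return out
-- ===== Notes on version B (the rewrite author's own statement) =====
-- stated objective: simpler
-- what changed: Replaces the three-list pipeline (transformed list, global index list of blanks, notinpattern gap scan with random-access indexing, then membership tests inside the output loop) by one backward pass computing each row's nearest following blank index and one forward pass that keeps a blank row iff that next blank exists and is not exactly two positions later.
import Mathlib
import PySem

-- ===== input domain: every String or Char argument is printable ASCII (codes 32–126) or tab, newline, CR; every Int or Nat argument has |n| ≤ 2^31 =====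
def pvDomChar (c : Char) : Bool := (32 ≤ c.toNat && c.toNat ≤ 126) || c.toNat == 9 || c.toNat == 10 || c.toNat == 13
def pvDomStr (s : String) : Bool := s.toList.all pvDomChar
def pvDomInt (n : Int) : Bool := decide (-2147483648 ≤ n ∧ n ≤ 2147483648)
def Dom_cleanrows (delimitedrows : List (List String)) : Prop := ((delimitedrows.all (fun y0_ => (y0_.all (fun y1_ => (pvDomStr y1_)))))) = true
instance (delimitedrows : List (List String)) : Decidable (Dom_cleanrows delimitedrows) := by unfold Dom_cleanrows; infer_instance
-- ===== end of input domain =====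

-- B replaces A's three-list pipeline by one backward next-blank pass plus one forward filter pass (simpler decomposition).

-- ===== PORT A =====
-- allblanks returns 'Blank' (encoded here as none, since a Python list never equals the string 'Blank') or the list itself.
def allblanks (i : List String) : Option (List String) :=
  if PySem.List.count i "" = i.length then none else some i

def repetitions (rows : List (List String)) : List Int :=
  let transformed := rows.map allblanks
  let indexed := (PySem.List.enumerate transformed).filterMap
      (fun p => if p.2 = none then some p.1 else none)
  (PySem.List.enumerate (PySem.List.slice indexed none (some (-1)))).foldl
    (fun acc p =>
      -- indexed[i+1]; in the Python loop i+1 is always in range, so pyGet? is always some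
      match PySem.List.pyGet? indexed (p.1 + 1) with
      | some v => if p.2 + 2 ≠ v then acc ++ [p.2] else acc
      | none => acc) []

def cleanrows (delimitedrows : List (List String)) : List (List String) :=
  let kept_blanks := repetitions delimitedrows
  (PySem.List.enumerate delimitedrows).foldl
    (fun acc p =>
      if allblanks p.2 ≠ none then acc ++ [p.2]
      else if kept_blanks.contains p.1 then acc ++ [p.2] else acc) []

-- ===== PORT B =====
def blankB (r : List String) : Bool := r.all (· == "")

-- backward pass: (next_blank list for the suffix starting at index i, nearest blank index ≥ i)
def nextBlanks : List (List String) → Int → List (Option Int) × Option Int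
  | [], _ => ([], none)
  | r :: rest, i =>
      let (tl, nb) := nextBlanks rest (i + 1)
      (nb :: tl, if blankB r then some i else nb)

-- forward pass over rows in parallel with the next_blank list
def forwardPass : List (List String) → List (Option Int) → Int → List (List String)
  | [], _, _ => []
  | r :: rest, nbs, i =>
      (if ¬ blankB r then [r]
       else match nbs.headD none with
            | some j => if j ≠ i + 2 then [r] else []
            | none => []) ++ forwardPass rest nbs.tail (i + 1)

def cleanrows_alt (delimitedrows : List (List String)) : List (List String) :=
  forwardPass delimitedrows (nextBlanks delimitedrows 0).1 0

-- ===== PRECONDITION & SPEC =====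
def Spec_cleanrows (delimitedrows : List (List String)) (out : List (List String)) : Prop := out = cleanrows_alt delimitedrows
instance (delimitedrows : List (List String)) (out : List (List String)) : Decidable (Spec_cleanrows delimitedrows out) := by unfold Spec_cleanrows; infer_instance

-- ===== CLAIM (what is proved, stated in full; the proofs are below) =====
def Claim_equal_cleanrows : Prop := ∀ (delimitedrows : List (List String)), Dom_cleanrows delimitedrows → Spec_cleanrows delimitedrows (cleanrows delimitedrows)

-- ===== LEMMAS AND PROOFS =====

-- offset (0-based) of the first blank row
def fbo : List (List String) → Option Int
  | [] => none
  | r :: rs => if blankB r then some 0 else (fbo rs).map (· + 1)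

-- reference filter, position-independent
def refClean : List (List String) → List (List String)
  | [] => []
  | r :: rs =>
      (if ¬ blankB r then [r]
       else match fbo rs with
            | some d => if d ≠ 1 then [r] else []
            | none => []) ++ refClean rs

-- indices of the blank rows, starting at index k
def blanks : List (List String) → Int → List Int
  | [], _ => []
  | r :: rs, k => (if blankB r then [k] else []) ++ blanks rs (k + 1)

-- recursive form of A's notinpattern loop
def nip : List Int → List Int
  | [] => []
  | [_] => []
  | a :: b :: t => (if a + 2 ≠ b then [a] else []) ++ nip (b :: t)

theorem allblanks_eq_none_iff (r : List String) : allblanks r = none ↔ blankB r = true := by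
  simp [allblanks, blankB, PySem.List.count_eq, List.count_eq_length]

theorem mem_blanks_ge {m : Int} : ∀ (rs : List (List String)) (k : Int), m ∈ blanks rs k → k ≤ m := by
  intro rs
  induction rs with
  | nil => intro k h; simp [blanks] at h
  | cons r rs ih =>
      intro k h
      simp [blanks] at h
      rcases h with h | h
      · rcases h with ⟨_, h2⟩; omega
      · have := ih (k + 1) h; omega

theorem nip_subset {m : Int} : ∀ (bs : List Int), m ∈ nip bs → m ∈ bs := by
  intro bs
  induction bs with
  | nil => intro h; simpa [nip] using h
  | cons a t ih =>
      cases t with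
      | nil => intro h; simp [nip] at h
      | cons b t' =>
          intro h
          simp only [nip, List.mem_append] at h
          rcases h with h | h
          · split at h <;> simp_all
          · exact List.mem_cons_of_mem a (ih h)

theorem blanks_head' (rs : List (List String)) : ∀ (m : Int),
    (blanks rs m).head? = (fbo rs).map (fun d => m + d) := by
  induction rs with
  | nil => intro m; simp [blanks, fbo]
  | cons r rs ih =>
      intro m
      by_cases hb : blankB r = true
      · simp [blanks, fbo, hb]
      · simp only [blanks, fbo, hb, Bool.false_eq_true, if_false, List.nil_append]
        rw [ih (m + 1)]
        cases h : fbo rs with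
        | none => simp
        | some d => simp; omega

-- ===== B side =====

theorem nextBlanks_snd (rs : List (List String)) : ∀ (k : Int),
    (nextBlanks rs k).2 = (fbo rs).map (fun d => k + d) := by
  induction rs with
  | nil => intro k; simp [nextBlanks, fbo]
  | cons r rs ih =>
      intro k
      by_cases hb : blankB r = true
      · simp [nextBlanks, fbo, hb]
      · simp only [nextBlanks, fbo, hb, Bool.false_eq_true, if_false]
        rw [ih (k + 1)]
        cases h : fbo rs with
        | none => simp
        | some d => simp; omega

theorem forwardPass_eq (rs : List (List String)) : ∀ (k : Int),
    forwardPass rs (nextBlanks rs k).1 k = refClean rs := by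
  induction rs with
  | nil => intro k; simp [forwardPass, refClean]
  | cons r rest ih =>
      intro k
      have hfst : (nextBlanks (r :: rest) k).1
          = (nextBlanks rest (k + 1)).2 :: (nextBlanks rest (k + 1)).1 := by
        simp [nextBlanks]
      rw [hfst]
      simp only [forwardPass, List.headD_cons, List.tail_cons, refClean]
      rw [ih (k + 1)]
      congr 1
      by_cases hb : blankB r
      · simp only [hb, not_true_eq_false, if_neg, Bool.true_eq_false, not_false_eq_true]
        rw [nextBlanks_snd]
        cases h : fbo rest with
        | none => simp
        | some d =>
            simp only [Option.map_some]
            by_cases hd : d = 1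
            · subst hd; simp [show k + 1 + 1 = k + 2 from by omega]
            · have : k + 1 + d ≠ k + 2 := by omega
              simp [this, hd]
      · simp [hb]

-- ===== A side =====

theorem indexed_eq (rows : List (List String)) : ∀ (s : Int),
    (PySem.List.enumerate (rows.map allblanks) s).filterMap
      (fun p => if p.2 = none then some p.1 else none) = blanks rows s := by
  induction rows with
  | nil => intro s; simp [blanks, PySem.List.enumerate_nil]
  | cons r rs ih =>
      intro s
      rw [List.map_cons, PySem.List.enumerate_cons, List.filterMap_cons]
      by_cases hb : blankB r
      · have : allblanks r = none := (allblanks_eq_none_iff r).mpr hb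
        simp only [this, if_pos rfl, blanks, hb, if_pos rfl]
        rw [ih (s + 1)]
        simp
      · have hnn : allblanks r ≠ none := fun h => hb ((allblanks_eq_none_iff r).mp h)
        simp only [blanks, hb]
        rw [if_neg (by simpa using hnn)]
        rw [ih (s + 1)]
        simp

theorem repLoop_eq : ∀ (bs pre acc : List Int),
    (PySem.List.enumerate bs.dropLast ((pre.length : Int))).foldl
      (fun acc p =>
        match PySem.List.pyGet? (pre ++ bs) (p.1 + 1) with
        | some v => if p.2 + 2 ≠ v then acc ++ [p.2] else acc
        | none => acc) acc = acc ++ nip bs := by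
  intro bs
  induction bs with
  | nil => intro pre acc; simp [nip, PySem.List.enumerate_nil]
  | cons a t ih =>
      cases t with
      | nil => intro pre acc; simp [nip, PySem.List.enumerate_nil]
      | cons b t' =>
          intro pre acc
          have hdl : (a :: b :: t').dropLast = a :: (b :: t').dropLast := by
            simp [List.dropLast_cons_of_ne_nil]
          rw [hdl, PySem.List.enumerate_cons, List.foldl_cons]
          have hget : PySem.List.pyGet? (pre ++ a :: b :: t') ((pre.length : Int) + 1)
              = some b := by
            have := PySem.List.pyGet?_append_length (pre := pre ++ [a]) (y := b) (ys := t')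
            simpa using this
          simp only [hget]
          have hlen : (pre.length : Int) + 1 = (((pre ++ [a]).length : Nat) : Int) := by
            simp
          rw [hlen]
          have := ih (pre ++ [a]) (if a + 2 ≠ b then acc ++ [a] else acc)
          rw [show pre ++ [a] ++ (b :: t') = pre ++ a :: b :: t' by simp] at this
          rw [this]
          simp only [nip]
          split <;> simp

theorem repetitions_eq (rows : List (List String)) :
    repetitions rows = nip (blanks rows 0) := by
  show (PySem.List.enumerate (PySem.List.slice
        ((PySem.List.enumerate (rows.map allblanks)).filterMap
          (fun p => if p.2 = none then some p.1 else none)) none (some (-1)))).foldl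
      (fun acc p =>
        match PySem.List.pyGet?
            ((PySem.List.enumerate (rows.map allblanks)).filterMap
              (fun p => if p.2 = none then some p.1 else none)) (p.1 + 1) with
        | some v => if p.2 + 2 ≠ v then acc ++ [p.2] else acc
        | none => acc) []
    = nip (blanks rows 0)
  rw [indexed_eq rows 0, PySem.List.slice_to_neg_one]
  simpa using repLoop_eq (blanks rows 0) [] []

theorem cleanFold_eq (rows : List (List String)) : ∀ (k : Int) (kept : List Int)
    (acc : List (List String)),
    (∀ m : Int, k ≤ m → (m ∈ kept ↔ m ∈ nip (blanks rows k))) →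
    (PySem.List.enumerate rows k).foldl
      (fun acc p =>
        if allblanks p.2 ≠ none then acc ++ [p.2]
        else if kept.contains p.1 then acc ++ [p.2] else acc) acc
      = acc ++ refClean rows := by
  induction rows with
  | nil => intro k kept acc _; simp [refClean, PySem.List.enumerate_nil]
  | cons r rs ih =>
      intro k kept acc H
      rw [PySem.List.enumerate_cons, List.foldl_cons]
      by_cases hb : blankB r
      · have hab : allblanks r = none := (allblanks_eq_none_iff r).mpr hb
        simp only [hab, ne_eq, not_true_eq_false, if_neg, not_not, if_false,
          not_false_eq_true]
        have hblanks : blanks (r :: rs) k = k :: blanks rs (k + 1) := by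
          simp [blanks, hb]
        -- membership of k in kept, via head of blanks rs (k+1)
        have Hk := H k (le_refl k)
        rw [hblanks] at Hk
        have H' : ∀ m : Int, k + 1 ≤ m → (m ∈ kept ↔ m ∈ nip (blanks rs (k + 1))) := by
          intro m hm
          have := H m (by omega)
          rw [hblanks] at this
          cases hbs : blanks rs (k + 1) with
          | nil => simpa [hbs, nip] using this
          | cons x xs =>
              rw [hbs] at this
              rw [this]
              simp only [nip, List.mem_append]
              have hne : m ≠ k := by omega
              constructor
              · rintro (h | h)
                · exfalso
                  revert h; split
                  · intro h; simp at h; omega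
                  · intro h; simp at h
                · exact h
              · intro h; exact Or.inr h
        rw [ih (k + 1) kept _ H']
        simp only [refClean, hb, not_true_eq_false, if_neg, Bool.true_eq_false,
          not_false_eq_true]
        cases hf : fbo rs with
        | none =>
            have hhd : (blanks rs (k + 1)).head? = none := by
              rw [blanks_head' rs (k + 1), hf]; rfl
            have hbs : blanks rs (k + 1) = [] := by
              cases hbs : blanks rs (k + 1) with
              | nil => rfl
              | cons x xs => rw [hbs] at hhd; simp at hhd
            rw [hbs] at Hk
            have : ¬ (k ∈ kept) := by
              intro h; have := Hk.mp h; simp [nip] at this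
            simp [List.contains_iff_mem, this]
        | some d =>
            have hhd : (blanks rs (k + 1)).head? = some (k + 1 + d) := by
              rw [blanks_head' rs (k + 1), hf]; rfl
            cases hbs : blanks rs (k + 1) with
            | nil => rw [hbs] at hhd; simp at hhd
            | cons x xs =>
                rw [hbs] at hhd
                have hx : x = k + 1 + d := by simpa using hhd
                rw [hbs] at Hk
                have hknotin : k ∉ nip (x :: xs) := by
                  intro h
                  have hmem := nip_subset _ h
                  have hge : ∀ y ∈ x :: xs, k + 1 ≤ y := by
                    intro y hy
                    exact mem_blanks_ge rs (k + 1) (hbs ▸ hy)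
                  have := hge k hmem
                  omega
                have hkk : k ∈ kept ↔ (k + 2 ≠ x) := by
                  rw [Hk]
                  simp only [nip, List.mem_append]
                  constructor
                  · intro h
                    rcases h with h | h
                    · intro hc; rw [← hc] at h; simp at h
                    · exact absurd h hknotin
                  · intro h; left; simp [h]
                by_cases hd : d = 1
                · have : ¬ (k + 2 ≠ x) := by omega
                  have hnk : ¬ (k ∈ kept) := fun h => this (hkk.mp h)
                  subst hd
                  simp [List.contains_iff_mem, hnk]
                · have hne : k + 2 ≠ x := by omega
                  have hik : k ∈ kept := hkk.mpr hne
                  simp [List.contains_iff_mem, hik, hd]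
      · have hnn : allblanks r ≠ none := fun h => hb ((allblanks_eq_none_iff r).mp h)
        simp only [ne_eq, hnn, not_false_eq_true, if_true]
        have hblanks : blanks (r :: rs) k = blanks rs (k + 1) := by
          simp [blanks, hb]
        have H' : ∀ m : Int, k + 1 ≤ m → (m ∈ kept ↔ m ∈ nip (blanks rs (k + 1))) := by
          intro m hm
          rw [← hblanks]
          exact H m (by omega)
        rw [ih (k + 1) kept _ H']
        simp [refClean, hb]

theorem cleanrows_eq_ref (rows : List (List String)) : cleanrows rows = refClean rows := by
  unfold cleanrows
  have H : ∀ m : Int, (0 : Int) ≤ m →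
      (m ∈ repetitions rows ↔ m ∈ nip (blanks rows 0)) := by
    intro m _
    rw [repetitions_eq]
  have := cleanFold_eq rows 0 (repetitions rows) [] H
  simpa using this

theorem cleanrows_alt_eq_ref (rows : List (List String)) :
    cleanrows_alt rows = refClean rows := by
  unfold cleanrows_alt
  exact forwardPass_eq rows 0

-- ===== VERDICT (by name: the statement is the Claim_ definition above) =====
theorem cleanrows_spec : Claim_equal_cleanrows := by
  intro rows _
  unfold Spec_cleanrows
  rw [cleanrows_eq_ref, cleanrows_alt_eq_ref]
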